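-- pv_equiv track=rewrite | github.com/aksenia/crossbuild-assessor | preprocess/liftover/annotate_with_liftover.py | modify_header
-- ===== SOURCE A (Python) =====
-- from typing import NamedTuple, Generator, List, Dict, Tuple, Optional, Union
--
-- def modify_header(header_lines: List[str], new_info_fields: List[str]) -> str:
--     """
--     Modify a VCF header with new INFO fields.
--
--     Args:
--         header_lines: List of header lines
--         new_info_fields: List of new INFO field definitions
--
--     Returns:
--         Modified header as a string
--     """
--     # Find #CHROM line index
--     try:
--         chrom_idx = next(i for i, line in enumerate(header_lines) if line.startswith('#CHROM'))
--     except StopIteration: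
--         raise ValueError("VCF header is missing #CHROM line")
--
--     # Insert new INFO fields before #CHROM
--     modified_header = header_lines.copy()
--     for info in reversed(new_info_fields):
--         modified_header.insert(chrom_idx, info)
--
--     # Join with newlines
--     return '\n'.join(modified_header)
-- ===== SOURCE B (Python) =====
-- def modify_header(header_lines, new_info_fields):
--     """
--     Modify a VCF header with new INFO fields.
--
--     Streams the header in one pass: the new INFO fields are emitted the
--     first time a '#CHROM' line is encountered, tracked by a flag; no
--     index search and no list splicing.
--     """
--     out = []
--     inserted = False
--     for line in header_lines:
--         if not inserted and line.startswith('#CHROM'):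
--             out.extend(new_info_fields)
--             inserted = True
--         out.append(line)
--     if not inserted:
--         raise ValueError("VCF header is missing #CHROM line")
--     return '\n'.join(out)
-- ===== Notes on version B (the rewrite author's own statement) =====
-- stated objective: alternative
-- what changed: Replaces A's two-phase find-index-then-splice (copy plus reversed insert-loop at a computed position) with a single streaming pass over the lines that emits the new fields the first time a '#CHROM' line appears, tracked by an inserted flag; no index arithmetic, no list copy, no insertion.
import Mathlib
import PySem

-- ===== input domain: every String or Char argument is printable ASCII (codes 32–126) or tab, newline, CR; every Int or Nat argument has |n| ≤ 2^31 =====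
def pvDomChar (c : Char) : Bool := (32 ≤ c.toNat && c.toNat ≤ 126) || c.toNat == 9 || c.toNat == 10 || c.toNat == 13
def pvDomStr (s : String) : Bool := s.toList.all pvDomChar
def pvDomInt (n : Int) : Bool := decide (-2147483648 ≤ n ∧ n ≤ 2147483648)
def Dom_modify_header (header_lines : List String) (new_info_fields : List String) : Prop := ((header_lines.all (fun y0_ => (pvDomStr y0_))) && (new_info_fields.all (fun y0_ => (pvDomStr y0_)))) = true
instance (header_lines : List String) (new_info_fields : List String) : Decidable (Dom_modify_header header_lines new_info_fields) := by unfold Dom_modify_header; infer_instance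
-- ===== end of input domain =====

-- B streams the header in one pass, emitting the new fields at the first '#CHROM' line
-- (flag-tracked), instead of A's find-index-then-splice; equal return value on Pre_.

-- ===== PORT A =====
-- next(i for i, line in enumerate(header_lines) if line.startswith('#CHROM'))
def findChromA : List String → Nat → Option Nat
  | [], _ => none
  | line :: rest, i =>
    if PySem.Str.startswith line "#CHROM" then some i else findChromA rest (i + 1)

def modify_header (header_lines : List String) (new_info_fields : List String) : String :=
  match findChromA header_lines 0 with
  | none => ""  -- Python raises ValueError("VCF header is missing #CHROM line"); excluded by Pre_
  | some chrom_idx =>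
    -- modified_header = header_lines.copy(); for info in reversed(new_info_fields): modified_header.insert(chrom_idx, info)
    let modified_header :=
      new_info_fields.reverse.foldl
        (fun acc info => PySem.List.insert acc (chrom_idx : Int) info) header_lines
    PySem.Str.join "\n" modified_header

-- ===== PORT B =====
-- loop body: if not inserted and line.startswith('#CHROM'): out.extend(new_info_fields); inserted = True
--            out.append(line)
def stepB (fields : List String) (st : List String × Bool) (line : String) : List String × Bool :=
  let st' := if !st.2 && PySem.Str.startswith line "#CHROM" then (st.1 ++ fields, true) else st
  (st'.1 ++ [line], st'.2)

def modify_header_alt (header_lines : List String) (new_info_fields : List String) : String :=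
  let res := header_lines.foldl (stepB new_info_fields) ([], false)
  if res.2 then PySem.Str.join "\n" res.1
  else ""  -- Python raises ValueError; excluded by Pre_

-- ===== PRECONDITION & SPEC =====
-- Both Pythons raise ValueError when no line starts with '#CHROM'; Pre_ admits exactly the returning inputs.
def Pre_modify_header (header_lines : List String) (new_info_fields : List String) : Prop :=
  (header_lines.any (fun l => PySem.Str.startswith l "#CHROM")) = true
instance (header_lines : List String) (new_info_fields : List String) : Decidable (Pre_modify_header header_lines new_info_fields) := by unfold Pre_modify_header; infer_instance

def pvWitness_modify_header : List String × List String :=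
  (["##fileformat=VCFv4.2", "#CHROM\tPOS", "rest"], ["##INFO=<ID=X>"])

def Spec_modify_header (header_lines : List String) (new_info_fields : List String) (out : String) : Prop := out = modify_header_alt header_lines new_info_fields
instance (header_lines : List String) (new_info_fields : List String) (out : String) : Decidable (Spec_modify_header header_lines new_info_fields out) := by unfold Spec_modify_header; infer_instance

-- ===== CLAIM (what is proved, stated in full; the proofs are below) =====
def Claim_equal_modify_header : Prop := ∀ (header_lines : List String) (new_info_fields : List String), Dom_modify_header header_lines new_info_fields → Pre_modify_header header_lines new_info_fields → Spec_modify_header header_lines new_info_fields (modify_header header_lines new_info_fields)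

-- ===== LEMMAS AND PROOFS =====

theorem findChromA_eq (lines : List String) (k : Nat) :
    findChromA lines k
      = (lines.findIdx? (fun l => PySem.Str.startswith l "#CHROM")).map (· + k) := by
  induction lines generalizing k with
  | nil => rfl
  | cons line rest ih =>
    rw [findChromA, List.findIdx?_cons]
    by_cases h : PySem.Str.startswith line "#CHROM" = true
    · rw [h]; simp
    · simp only [Bool.not_eq_true] at h
      rw [h]
      simp only [Bool.false_eq_true, if_false, ih (k + 1), Option.map_map]
      cases rest.findIdx? (fun l => PySem.Str.startswith l "#CHROM") with
      | none => rfl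
      | some j =>
        simp only [Option.map_some, Function.comp_apply]
        congr 1
        omega

theorem foldl_stepB_true (fields acc : List String) (lines : List String) :
    lines.foldl (stepB fields) (acc, true) = (acc ++ lines, true) := by
  induction lines generalizing acc with
  | nil => simp
  | cons l rest ih =>
    simp only [List.foldl_cons, stepB, Bool.not_true, Bool.false_and,
      Bool.false_eq_true, if_false, ih]
    simp

theorem foldl_stepB_false (fields acc : List String) (lines : List String) :
    lines.foldl (stepB fields) (acc, false)
      = match lines.findIdx? (fun l => PySem.Str.startswith l "#CHROM") with
        | some j => (acc ++ lines.take j ++ fields ++ lines.drop j, true)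
        | none => (acc ++ lines, false) := by
  induction lines generalizing acc with
  | nil => simp
  | cons l rest ih =>
    rw [List.foldl_cons, List.findIdx?_cons]
    by_cases h : PySem.Str.startswith l "#CHROM" = true
    · rw [h]
      simp only [stepB, Bool.not_false, Bool.true_and, h, if_true, foldl_stepB_true]
      simp
    · simp only [Bool.not_eq_true] at h
      rw [h]
      simp only [stepB, Bool.not_false, Bool.true_and, h, Bool.false_eq_true, if_false, ih]
      cases hf : rest.findIdx? (fun l => PySem.Str.startswith l "#CHROM") with
      | none => simp
      | some j => simp

theorem insert_loop_eq (fields h : List String) (i : Nat) (hi : i ≤ h.length) :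
    fields.reverse.foldl (fun acc info => PySem.List.insert acc (i : Int) info) h
      = h.take i ++ fields ++ h.drop i := by
  rw [List.foldl_reverse]
  induction fields with
  | nil => simp
  | cons f fs ih =>
    simp only [List.foldr_cons, ih]
    have hlen : i ≤ (h.take i ++ fs ++ h.drop i).length := by
      simp [List.length_take]; omega
    rw [PySem.List.insert_natCast _ _ _ hlen]
    have htake : (h.take i ++ fs ++ h.drop i).take i = h.take i := by
      rw [List.append_assoc, List.take_append_of_le_length (by simp; omega),
          List.take_take, min_self]
    have hdrop : (h.take i ++ fs ++ h.drop i).drop i = fs ++ h.drop i := by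
      rw [List.append_assoc, List.drop_append_of_le_length (by simp; omega)]
      simp
    rw [htake, hdrop]
    simp

-- ===== VERDICT (by name: the statement is the Claim_ definition above) =====
theorem modify_header_spec : Claim_equal_modify_header := by
  intro h f _ hpre
  unfold Spec_modify_header modify_header modify_header_alt
  obtain ⟨j, hj⟩ : ∃ j, h.findIdx? (fun l => PySem.Str.startswith l "#CHROM") = some j := by
    unfold Pre_modify_header at hpre
    rcases List.any_eq_true.mp hpre with ⟨x, hx, hpx⟩
    cases hfind : h.findIdx? (fun l => PySem.Str.startswith l "#CHROM") with
    | none =>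
      have hfalse := List.findIdx?_eq_none_iff.mp hfind x hx
      rw [hpx] at hfalse
      cases hfalse
    | some j => exact ⟨j, rfl⟩
  have hjlt : j < h.length := (List.findIdx?_eq_some_iff_findIdx_eq.mp hj).1
  rw [findChromA_eq, foldl_stepB_false, hj]
  simp only [Option.map_some]
  rw [insert_loop_eq f h (j + 0) (by omega)]
  simp
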